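-- pv_equiv track=rewrite | github.com/acasadoalonso/SWiface | SWiface.py | datal
-- ===== SOURCE A (Python) =====
-- def datal(data, typer):                        # get data on the left
--     p = data.find(typer)                        # scan for the type requested
--     if p == -1:
--         return (" ")
--     pb = p
--     while (data[pb] != ' ' and data[pb] != '/' and pb >= 0):
--         pb -= 1
--     ret = data[pb +1:p]                         # return the data requested
--     return(ret)
-- ===== SOURCE B (Python) =====
-- def datal(data, typer):                        # get data on the left
--     p = data.find(typer)
--     if p == -1:
--         return " "
--     start = 0                                  # one forward pass: remember slice start
--     for i in range(p + 1):
--         if data[i] == ' ' or data[i] == '/':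
--             start = i + 1
--     return data[start:p]
-- ===== Notes on version B (the rewrite author's own statement) =====
-- stated objective: alternative
-- what changed: A scans backward from the match (including a data[-1] negative-index probe) until it hits a delimiter; B makes one forward pass over data[0..p] with an accumulator holding the token start (position after the last delimiter seen), then slices once.
import Mathlib
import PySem

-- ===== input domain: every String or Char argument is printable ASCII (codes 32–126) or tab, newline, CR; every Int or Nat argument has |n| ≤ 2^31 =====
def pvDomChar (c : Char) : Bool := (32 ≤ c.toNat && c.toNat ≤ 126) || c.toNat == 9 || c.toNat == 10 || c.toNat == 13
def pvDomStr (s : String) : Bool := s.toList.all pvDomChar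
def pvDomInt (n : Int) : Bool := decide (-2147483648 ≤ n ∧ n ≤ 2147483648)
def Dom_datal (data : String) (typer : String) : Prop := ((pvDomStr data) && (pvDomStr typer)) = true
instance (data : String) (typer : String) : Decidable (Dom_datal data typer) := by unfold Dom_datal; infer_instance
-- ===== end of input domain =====

-- B replaces A's backward scan from the match (with its data[-1] probe) by one forward
-- pass over data[0..p] keeping the token start in an accumulator; same return value
-- everywhere A returns.

-- ===== PORT A =====
-- the 'while (data[pb] != ' ' and data[pb] != '/' and pb >= 0): pb -= 1' loop;
-- the 'none' arm is Python's IndexError (data[0] on empty data), excluded by Pre_datal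
def datalLoop (cs : List Char) (pb : Int) : Int :=
  match PySem.List.pyGet? cs pb with
  | none => pb
  | some c =>
    if c ≠ ' ' ∧ c ≠ '/' ∧ 0 ≤ pb then datalLoop cs (pb - 1) else pb
termination_by (pb + 1).toNat
decreasing_by omega

def datal (data : String) (typer : String) : String :=
  let p := PySem.Str.find data typer
  if p = -1 then " "
  else
    let pb := datalLoop data.toList p
    PySem.Str.slice data (some (pb + 1)) (some p)

-- ===== PORT B =====
-- 'for i in range(p+1): if data[i] == ' ' or data[i] == '/': start = i+1';
-- data[i] is ported as pyGet?; indices stay in range (0 ≤ i ≤ p < len), so this is exact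
def datal_alt (data : String) (typer : String) : String :=
  let p := PySem.Str.find data typer
  if p = -1 then " "
  else
    let start := (PySem.List.pyRange 0 (p + 1) 1).foldl
      (fun st i =>
        if PySem.List.pyGet? data.toList i = some ' ' ∨
           PySem.List.pyGet? data.toList i = some '/' then i + 1 else st) 0
    PySem.Str.slice data (some start) (some p)

-- ===== PRECONDITION & SPEC =====
-- Pre_ excludes only data = "" with typer = "", where A raises IndexError (data[0]).
def Pre_datal (data : String) (typer : String) : Prop := ¬ (data = "" ∧ typer = "")
instance (data : String) (typer : String) : Decidable (Pre_datal data typer) := by unfold Pre_datal; infer_instance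
def pvWitness_datal : String × String := ("cmd a/b7 x", "7")

def Spec_datal (data : String) (typer : String) (out : String) : Prop := out = datal_alt data typer
instance (data : String) (typer : String) (out : String) : Decidable (Spec_datal data typer out) := by unfold Spec_datal; infer_instance

-- ===== CLAIM (what is proved, stated in full; the proofs are below) =====
def Claim_equal_datal : Prop := ∀ (data : String) (typer : String), Dom_datal data typer → Pre_datal data typer → Spec_datal data typer (datal data typer)

-- ===== LEMMAS AND PROOFS =====

theorem datalLoop_neg_one (cs : List Char) : datalLoop cs (-1) = -1 := by
  unfold datalLoop
  cases PySem.List.pyGet? cs (-1) with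
  | none => rfl
  | some c => simp

-- one unfolding of A's loop when the index is in range
theorem datalLoop_some (cs : List Char) (c : Char) (pb : Int)
    (h : PySem.List.pyGet? cs pb = some c) :
    datalLoop cs pb =
      if c ≠ ' ' ∧ c ≠ '/' ∧ 0 ≤ pb then datalLoop cs (pb - 1) else pb := by
  conv_lhs => rw [datalLoop]
  rw [h]

-- the forward fold over range(p+1) computes (last delimiter index ≤ p) + 1,
-- i.e. exactly one more than where A's backward scan stops
theorem fold_eq_loop (cs : List Char) (p : Nat) (h : p < cs.length) :
    (PySem.List.pyRange 0 ((p : Int) + 1) 1).foldl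
      (fun st i =>
        if PySem.List.pyGet? cs i = some ' ' ∨ PySem.List.pyGet? cs i = some '/'
        then i + 1 else st) 0
    = datalLoop cs p + 1 := by
  induction p with
  | zero =>
    have hget : PySem.List.pyGet? cs ((0 : Nat) : Int) = some cs[0] := by
      rw [PySem.List.pyGet?_natCast cs 0, List.getElem?_eq_getElem h]
    have hget0 : PySem.List.pyGet? cs (0 : Int) = some cs[0] := by
      rw [show (0 : Int) = ((0 : Nat) : Int) by simp]; exact hget
    rw [show ((0 : Nat) : Int) + 1 = 0 + 1 by norm_num, PySem.List.pyRange_one_singleton,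
      List.foldl, List.foldl, datalLoop_some cs cs[0] ((0 : Nat) : Int) hget]
    by_cases hsp : cs[0] = ' '
    · rw [if_pos (Or.inl (by rw [hget0, hsp])), if_neg (fun hc => hc.1 hsp)]
      norm_num
    · by_cases hsl : cs[0] = '/'
      · rw [if_pos (Or.inr (by rw [hget0, hsl])), if_neg (fun hc => hc.2.1 hsl)]
        norm_num
      · rw [if_neg (by simp [hget0, hsp, hsl]), if_pos ⟨hsp, hsl, by positivity⟩,
          show ((0 : Nat) : Int) - 1 = -1 by simp, datalLoop_neg_one]
        norm_num
  | succ k ih =>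
    have hk : k < cs.length := by omega
    have hcast : ((k + 1 : Nat) : Int) = (k : Int) + 1 := by push_cast; ring
    rw [hcast, PySem.List.pyRange_one_succ_right (by omega : (0:Int) ≤ (k:Int) + 1),
      List.foldl_append, ih hk]
    have hget : PySem.List.pyGet? cs ((k : Int) + 1) = some cs[k + 1] := by
      rw [← hcast, PySem.List.pyGet?_natCast cs (k + 1), List.getElem?_eq_getElem h]
    rw [List.foldl, List.foldl, datalLoop_some cs cs[k + 1] ((k : Int) + 1) hget]
    by_cases hsp : cs[k + 1] = ' '
    · rw [if_pos (Or.inl (by rw [hget, hsp])), if_neg (fun hc => hc.1 hsp)]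
    · by_cases hsl : cs[k + 1] = '/'
      · rw [if_pos (Or.inr (by rw [hget, hsl])), if_neg (fun hc => hc.2.1 hsl)]
      · rw [if_neg (by simp [hget, hsp, hsl]), if_pos ⟨hsp, hsl, by positivity⟩,
          show (k : Int) + 1 - 1 = (k : Int) by ring]

-- the found index is strictly inside the string, given Pre_
theorem find_lt_length (data typer : String) (hpre : Pre_datal data typer)
    (hne : PySem.Str.find data typer ≠ -1) :
    ∃ p : Nat, PySem.Str.find data typer = (p : Int) ∧ p < data.toList.length := by
  rw [PySem.Str.find_eq] at hne ⊢
  set s := data.toList with hs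
  set sub := typer.toList with hsub
  have hnn : 0 ≤ PySem.Chars.find s sub := by
    have := PySem.Chars.neg_one_le_find s sub
    omega
  have hle := PySem.Chars.find_le_length s sub
  refine ⟨(PySem.Chars.find s sub).toNat, by omega, ?_⟩
  by_contra hge
  have heq : (PySem.Chars.find s sub).toNat = s.length := by omega
  have hspec := (PySem.Chars.find_spec hnn).1
  rw [heq, List.drop_length] at hspec
  have hsubnil : sub = [] := List.prefix_nil.mp hspec
  have hslen : s.length = 0 := by
    have hfind0 : PySem.Chars.find s sub = 0 := hsubnil ▸ PySem.Chars.find_nil s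
    omega
  have hdata : data = "" := String.toList_eq_nil_iff.mp (List.eq_nil_of_length_eq_zero (hs ▸ hslen))
  have htyper : typer = "" := String.toList_eq_nil_iff.mp hsubnil
  exact hpre ⟨hdata, htyper⟩

-- ===== VERDICT (by name: the statement is the Claim_ definition above) =====
theorem datal_spec : Claim_equal_datal := by
  intro data typer _ hpre
  unfold Spec_datal datal datal_alt
  by_cases hfind : PySem.Str.find data typer = -1
  · rw [if_pos hfind, if_pos hfind]
  · obtain ⟨p, hp, hplt⟩ := find_lt_length data typer hpre hfind
    rw [hp, if_neg (hp ▸ hfind), if_neg (hp ▸ hfind),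
      fold_eq_loop data.toList p hplt]
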